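-- pv_equiv track=rewrite | github.com/HopeZobinou/sql_nyc_health_inspector_data_management_and_queries | dbga.py | __standardize_comparisons
-- ===== SOURCE A (Python) =====
-- def __standardize_comparisons(
--                               sql:str
--                               ) -> str:
--     to_replace = {'==' : '=',
--                   '<>' : '!='
--                   }
--     for key, value in to_replace.items():
--         sql = sql.replace(key, value)
--     return sql
-- ===== SOURCE B (Python) =====
-- def __standardize_comparisons(
--                               sql:str
--                               ) -> str:
--     # single left-to-right scan, dispatching each operator as it is met
--     out = []
--     i = 0
--     n = len(sql)
--     while i < n:
--         if sql.startswith('==', i):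
--             out.append('=')
--             i += 2
--         elif sql.startswith('<>', i):
--             out.append('!=')
--             i += 2
--         else:
--             out.append(sql[i])
--             i += 1
--     return ''.join(out)
-- ===== Notes on version B (the rewrite author's own statement) =====
-- stated objective: alternative
-- what changed: Replaces A's two sequential full-string .replace passes by a single left-to-right scan that dispatches '==' and '<>' as each is met; equivalence holds because the two patterns are over disjoint characters and neither replacement can create a match of the other.
import Mathlib
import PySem

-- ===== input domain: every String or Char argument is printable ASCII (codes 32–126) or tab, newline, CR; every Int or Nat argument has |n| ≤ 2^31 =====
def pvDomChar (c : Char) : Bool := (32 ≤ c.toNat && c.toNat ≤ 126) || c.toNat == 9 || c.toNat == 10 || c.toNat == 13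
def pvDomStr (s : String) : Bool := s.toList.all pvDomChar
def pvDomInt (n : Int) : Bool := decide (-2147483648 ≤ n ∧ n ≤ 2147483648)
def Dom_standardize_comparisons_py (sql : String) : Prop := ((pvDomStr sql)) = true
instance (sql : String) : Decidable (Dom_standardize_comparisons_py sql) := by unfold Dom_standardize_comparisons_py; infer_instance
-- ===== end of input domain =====

-- B replaces A's two sequential full-string .replace passes by one left-to-right scan (alternative decomposition, same cost).

-- ===== PORT A =====
-- A: for key, value in {'==':'=', '<>':'!='}.items(): sql = sql.replace(key, value)
def standardize_comparisons_py (sql : String) : String :=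
  List.foldl (fun s kv => PySem.Str.replace s kv.1 kv.2) sql [("==", "="), ("<>", "!=")]

-- ===== PORT B =====
-- B: single scan; at each position emit '=' for '==', "!=" for '<>', else copy the character.
def altScan : List Char → List Char
  | [] => []
  | [c] => [c]
  | c :: d :: t =>
    if c = '=' ∧ d = '=' then '=' :: altScan t
    else if c = '<' ∧ d = '>' then '!' :: '=' :: altScan t
    else c :: altScan (d :: t)

def standardize_comparisons_py_alt (sql : String) : String :=
  String.ofList (altScan sql.toList)

-- ===== PRECONDITION & SPEC =====
def Spec_standardize_comparisons_py (sql : String) (out : String) : Prop := out = standardize_comparisons_py_alt sql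
instance (sql : String) (out : String) : Decidable (Spec_standardize_comparisons_py sql out) := by unfold Spec_standardize_comparisons_py; infer_instance

-- ===== CLAIM (what is proved, stated in full; the proofs are below) =====
def Claim_equal_standardize_comparisons_py : Prop := ∀ (sql : String), Dom_standardize_comparisons_py sql → Spec_standardize_comparisons_py sql (standardize_comparisons_py sql)

-- ===== LEMMAS AND PROOFS =====

-- Structural characterisation of one .replace pass with a two-character pattern.
def rep2 (a b : Char) (new : List Char) : List Char → List Char
  | [] => []
  | [c] => [c]
  | c :: d :: t =>
    if c = a ∧ d = b then new ++ rep2 a b new t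
    else c :: rep2 a b new (d :: t)

theorem replace_go_eq (a b : Char) (new : List Char) :
    ∀ (fuel : Nat) (l acc : List Char), l.length ≤ fuel →
      PySem.Chars.replace.go [a, b] new fuel l acc = acc.reverse ++ rep2 a b new l := by
  intro fuel
  induction fuel with
  | zero =>
    intro l acc h
    have : l = [] := List.length_eq_zero_iff.mp (Nat.le_zero.mp h)
    subst this
    simp [PySem.Chars.replace.go, rep2]
  | succ n ih =>
    intro l acc h
    match l with
    | [] => simp [PySem.Chars.replace.go, rep2]
    | [c] =>
      have hpre : ([a, b].isPrefixOf [c]) = false := by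
        simp [List.isPrefixOf]
      simp only [PySem.Chars.replace.go, hpre, Bool.false_eq_true, if_false]
      rw [ih [] (c :: acc) (by simp)]
      simp [rep2]
    | c :: d :: t =>
      by_cases hcd : c = a ∧ d = b
      · obtain ⟨hc, hd⟩ := hcd
        subst hc; subst hd
        have hpre : ([c, d].isPrefixOf (c :: d :: t)) = true := by
          simp [List.isPrefixOf]
        simp only [PySem.Chars.replace.go, hpre, if_true]
        simp only [List.length_cons, List.length_nil, List.drop_succ_cons, List.drop_zero]
        rw [ih t _ (by simp at h ⊢; omega)]
        simp [rep2]
      · have hpre : ([a, b].isPrefixOf (c :: d :: t)) = false := by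
          simp only [List.isPrefixOf, Bool.and_eq_false_iff, beq_eq_false_iff_ne, ne_eq]
          by_cases hc : c = a
          · subst hc
            right; left
            intro hdb
            exact hcd ⟨rfl, hdb.symm⟩
          · left; intro h'; exact hc h'.symm
        simp only [PySem.Chars.replace.go, hpre, Bool.false_eq_true, if_false]
        rw [ih (d :: t) (c :: acc) (by simp at h ⊢; omega)]
        simp [rep2, hcd]

theorem replace_eq_rep2 (a b : Char) (new cs : List Char) :
    PySem.Chars.replace cs [a, b] new = rep2 a b new cs := by
  simp only [PySem.Chars.replace, List.isEmpty_cons, Bool.false_eq_true, if_false]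
  rw [replace_go_eq a b new cs.length cs [] (le_refl _)]
  simp

-- the '==' pass keeps the first character of a nonempty input
theorem repEq_head (d : Char) (t : List Char) :
    ∃ r, rep2 '=' '=' ['='] (d :: t) = d :: r := by
  match t with
  | [] => exact ⟨[], rfl⟩
  | e :: t' =>
    by_cases h : d = '=' ∧ e = '='
    · obtain ⟨h1, h2⟩ := h
      subst h1; subst h2
      exact ⟨rep2 '=' '=' ['='] t', by simp [rep2]⟩
    · exact ⟨rep2 '=' '=' ['='] (e :: t'), by simp [rep2, h]⟩

-- the '<>' pass acts homomorphically on a head character other than '<'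
theorem repNe_cons_of_ne (c : Char) (hc : c ≠ '<') (x : List Char) :
    rep2 '<' '>' ['!', '='] (c :: x) = c :: rep2 '<' '>' ['!', '='] x := by
  match x with
  | [] => simp [rep2]
  | y :: ys =>
    have : ¬ (c = '<' ∧ y = '>') := fun h => hc h.1
    simp [rep2, this]

theorem rep2_comp_eq_altScan (cs : List Char) :
    rep2 '<' '>' ['!', '='] (rep2 '=' '=' ['='] cs) = altScan cs := by
  fun_induction altScan cs with
  | case1 => simp [rep2]
  | case2 c => simp [rep2]
  | case3 c d t h ih =>
    obtain ⟨hc, hd⟩ := h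
    subst hc; subst hd
    simp only [rep2, and_self, if_true, List.singleton_append]
    rw [repNe_cons_of_ne '=' (by decide), ih]
  | case4 c d t h1 h2 ih =>
    obtain ⟨hc, hd⟩ := h2
    subst hc; subst hd
    have h3 : rep2 '=' '=' ['='] ('<' :: '>' :: t) = '<' :: '>' :: rep2 '=' '=' ['='] t := by
      have hne : ('<' : Char) ≠ '=' := by decide
      have hne2 : ('>' : Char) ≠ '=' := by decide
      match t with
      | [] => simp [rep2, hne, hne2]
      | e :: t' => simp [rep2, hne, hne2]
    rw [h3]
    simp [rep2, ih]
  | case5 c d t h1 h2 ih =>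
    have h3 : rep2 '=' '=' ['='] (c :: d :: t) = c :: rep2 '=' '=' ['='] (d :: t) := by
      simp [rep2, h1]
    rw [h3]
    obtain ⟨r, hr⟩ := repEq_head d t
    rw [hr]
    by_cases hc : c = '<'
    · subst hc
      have hd : d ≠ '>' := fun h => h2 ⟨rfl, h⟩
      rw [show rep2 '<' '>' ['!', '='] ('<' :: d :: r) = '<' :: rep2 '<' '>' ['!', '='] (d :: r)
            from by simp [rep2, hd]]
      rw [← hr, ih]
    · rw [repNe_cons_of_ne c hc, ← hr, ih]

-- ===== VERDICT (by name: the statement is the Claim_ definition above) =====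
theorem standardize_comparisons_py_spec : Claim_equal_standardize_comparisons_py := by
  intro sql _
  unfold Spec_standardize_comparisons_py standardize_comparisons_py standardize_comparisons_py_alt
  simp only [List.foldl, PySem.Str.replace]
  rw [String.toList_ofList]
  rw [show ("==" : String).toList = ['=', '='] from rfl,
      show ("=" : String).toList = ['='] from rfl,
      show ("<>" : String).toList = ['<', '>'] from rfl,
      show ("!=" : String).toList = ['!', '='] from rfl]
  rw [replace_eq_rep2, replace_eq_rep2, rep2_comp_eq_altScan]
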